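-- pv_equiv track=rewrite | github.com/grapheneaffiliate/h4-polytopic-attention | solve_arc_b8.py | solve_623ea044
-- ===== SOURCE A (Python) =====
-- def solve_623ea044(grid):
--     rows = len(grid)
--     cols = len(grid[0])
--     result = [[0]*cols for _ in range(rows)]
--     dot_r, dot_c, color = -1, -1, 0
--     for r in range(rows):
--         for c in range(cols):
--             if grid[r][c] != 0:
--                 dot_r, dot_c, color = r, c, grid[r][c]
--     result[dot_r][dot_c] = color
--     for dr, dc in [(-1,-1),(-1,1),(1,-1),(1,1)]:
--         r, c = dot_r + dr, dot_c + dc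
--         while 0 <= r < rows and 0 <= c < cols:
--             result[r][c] = color
--             r += dr; c += dc
--     return result
-- ===== SOURCE B (Python) =====
-- def solve_623ea044(grid):
--     cols = len(grid[0])
--     dot_r, dot_c, color = -1, -1, 0
--     for r, row in enumerate(grid):
--         for c, v in enumerate(row[:cols]):
--             if v != 0:
--                 dot_r, dot_c, color = r, c, v
--     return [[color if abs(r - dot_r) == abs(c - dot_c) else 0
--              for c in range(cols)]
--             for r in range(len(grid))]
-- ===== Notes on version B (the rewrite author's own statement) =====
-- stated objective: simpler
-- what changed: The four directional ray-walking while-loops (plus the separate dot assignment) are replaced by one whole-grid pass that sets a cell to the colour exactly when abs(r-dot_r)==abs(c-dot_c); the last-nonzero dot scan is kept.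
import Mathlib
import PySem

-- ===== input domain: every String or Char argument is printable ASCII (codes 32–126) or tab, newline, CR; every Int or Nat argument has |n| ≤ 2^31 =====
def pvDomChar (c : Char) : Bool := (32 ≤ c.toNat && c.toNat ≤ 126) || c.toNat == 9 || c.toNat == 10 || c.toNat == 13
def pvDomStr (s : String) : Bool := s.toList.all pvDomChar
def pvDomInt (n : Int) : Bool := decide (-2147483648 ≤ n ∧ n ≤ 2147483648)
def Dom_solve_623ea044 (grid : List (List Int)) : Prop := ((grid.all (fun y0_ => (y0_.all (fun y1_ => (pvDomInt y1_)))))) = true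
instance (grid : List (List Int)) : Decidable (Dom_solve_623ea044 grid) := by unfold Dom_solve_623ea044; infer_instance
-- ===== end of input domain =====

-- B replaces A's four directional ray-walking while-loops by one whole-grid pass with the
-- diagonal predicate |r - dot_r| = |c - dot_c| (simpler decomposition, same last-nonzero dot scan).

-- ===== PORT A =====
-- Python `result[r][c] = v` (list assignment, negative-index wraparound; in range on Pre_)
def pySet2 (m : List (List Int)) (r c : Int) (v : Int) : List (List Int) :=
  let ri : Nat := (if r < 0 then r + m.length else r).toNat
  let row : List Int := m.getD ri []
  let ci : Nat := (if c < 0 then c + row.length else c).toNat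
  m.set ri (row.set ci v)

-- the `while 0 <= r < rows and 0 <= c < cols:` ray walk; the fuel rows+cols+2 bounds the
-- step count (each step moves r by ±1, so the loop always stops within that many steps)
def walkA (rows cols dr dc color : Int) : Nat → Int → Int → List (List Int) → List (List Int)
  | 0, _, _, m => m
  | f+1, r, c, m =>
      if 0 ≤ r ∧ r < rows ∧ 0 ≤ c ∧ c < cols then
        walkA rows cols dr dc color f (r + dr) (c + dc) (pySet2 m r c color)
      else m

-- the nested `for r in range(rows): for c in range(cols): if grid[r][c] != 0:` scan
def scanA (grid : List (List Int)) (cols : Nat) : Int × Int × Int :=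
  (List.range grid.length).foldl (fun s r =>
    (List.range cols).foldl (fun s c =>
      if (grid.getD r []).getD c 0 ≠ 0 then ((r : Int), (c : Int), (grid.getD r []).getD c 0)
      else s) s)
    (-1, -1, 0)

def solve_623ea044 (grid : List (List Int)) : List (List Int) :=
  let rows : Nat := grid.length
  let cols : Nat := (grid.headD []).length
  let st := scanA grid cols
  let r0 := pySet2 (List.replicate rows (List.replicate cols (0 : Int))) st.1 st.2.1 st.2.2
  [((-1 : Int), (-1 : Int)), (-1, 1), (1, -1), (1, 1)].foldl
    (fun m d =>
      walkA (rows : Int) (cols : Int) d.1 d.2 st.2.2 (rows + cols + 2) (st.1 + d.1) (st.2.1 + d.2) m)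
    r0


-- ===== PORT B =====
-- the `for r, row in enumerate(grid): for c, v in enumerate(row[:cols]):` scan
-- (row[:cols] with cols = len(grid[0]) ≥ 0 is exactly List.take cols)
def scanB (grid : List (List Int)) (cols : Nat) : Int × Int × Int :=
  (PySem.List.enumerate grid 0).foldl (fun s p =>
    (PySem.List.enumerate (p.2.take cols) 0).foldl (fun s q =>
      if q.2 ≠ 0 then (p.1, q.1, q.2) else s) s)
    (-1, -1, 0)

def solve_623ea044_alt (grid : List (List Int)) : List (List Int) :=
  let cols : Nat := (grid.headD []).length
  let st := scanB grid cols
  (List.range grid.length).map (fun (r : Nat) =>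
    (List.range cols).map (fun (c : Nat) =>
      if ((r : Int) - st.1).natAbs = ((c : Int) - st.2.1).natAbs then st.2.2 else 0))


-- ===== PRECONDITION & SPEC =====
-- Pre_ = exactly the inputs on which the Python A returns: grid nonempty, first row nonempty
-- (else result[-1][-1] raises IndexError), and no row shorter than the first row
-- (else grid[r][c] raises IndexError).
def Pre_solve_623ea044 (grid : List (List Int)) : Prop :=
  grid ≠ [] ∧ 0 < (grid.headD []).length ∧ ∀ row ∈ grid, (grid.headD []).length ≤ row.length
instance (grid : List (List Int)) : Decidable (Pre_solve_623ea044 grid) := by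
  unfold Pre_solve_623ea044; infer_instance

def pvWitness_solve_623ea044 : List (List Int) := [[0, 0, 0], [0, 2, 0], [0, 0, 0]]

def Spec_solve_623ea044 (grid : List (List Int)) (out : List (List Int)) : Prop := out = solve_623ea044_alt grid
instance (grid : List (List Int)) (out : List (List Int)) : Decidable (Spec_solve_623ea044 grid out) := by unfold Spec_solve_623ea044; infer_instance

-- ===== CLAIM (what is proved, stated in full; the proofs are below) =====
def Claim_equal_solve_623ea044 : Prop := ∀ (grid : List (List Int)), Dom_solve_623ea044 grid → Pre_solve_623ea044 grid → Spec_solve_623ea044 grid (solve_623ea044 grid)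

-- ===== LEMMAS AND PROOFS =====

def get2 (m : List (List Int)) (x y : Nat) : Int := (m.getD x []).getD y 0

lemma getD_set' {α : Type} (l : List α) (i j : Nat) (a d : α) :
    (l.set i a).getD j d = if i = j ∧ j < l.length then a else l.getD j d := by
  rw [List.getD_eq_getElem?_getD, List.getElem?_set, List.getD_eq_getElem?_getD]
  by_cases h : i = j
  · subst h
    by_cases hl : i < l.length
    · simp [hl]
    · simp [hl, List.getElem?_eq_none (by omega : l.length ≤ i)]
  · simp [h]

lemma rowlen_pySet2 (m : List (List Int)) (r c v : Int) (x : Nat) :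
    ((pySet2 m r c v).getD x []).length = (m.getD x []).length := by
  simp only [pySet2]
  rw [getD_set']
  by_cases h : (if r < 0 then r + (m.length : Int) else r).toNat = x ∧ x < m.length
  · rw [if_pos h, List.length_set, ← h.1]
  · rw [if_neg h]

lemma length_pySet2 (m : List (List Int)) (r c v : Int) :
    (pySet2 m r c v).length = m.length := by
  simp [pySet2]

lemma get2_pySet2 (m : List (List Int)) (r c v : Int) (hr : 0 ≤ r) (hrl : r < (m.length : Int))
    (hc : 0 ≤ (if c < 0 then c + ((m.getD r.toNat []).length : Int) else c))
    (hc' : (if c < 0 then c + ((m.getD r.toNat []).length : Int) else c) < ((m.getD r.toNat []).length : Int))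
    (x y : Nat) :
    get2 (pySet2 m r c v) x y =
      if (x : Int) = r ∧ (y : Int) = (if c < 0 then c + ((m.getD r.toNat []).length : Int) else c) then v
      else get2 m x y := by
  have hri : (if r < 0 then r + (m.length : Int) else r) = r := if_neg (by omega)
  by_cases hcneg : c < 0 <;>
    simp only [pySet2, get2, hri, hcneg, if_true, if_false] <;>
    simp only [hcneg, if_true, if_false] at hc hc' <;>
  · rw [getD_set']
    by_cases hx : (x : Int) = r
    · have hxr : r.toNat = x ∧ x < m.length := by omega
      rw [if_pos hxr, getD_set']
      have hrx : m.getD r.toNat [] = m.getD x [] := by rw [hxr.1]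
      rw [hrx] at hc' ⊢
      try rw [hrx] at hc
      by_cases hyw : (y : Int) = (if c < 0 then c + ((m.getD x []).length : Int) else c) <;>
        simp only [hcneg, if_true, if_false] at hyw
      · rw [if_pos (by omega), if_pos ⟨hx, hyw⟩]
      · rw [if_neg (by omega), if_neg (by tauto)]
    · rw [if_neg (by omega), if_neg (by tauto)]

def onRayB (dr dc r c : Int) (f : Nat) (x y : Nat) : Bool :=
  (List.range f).any (fun k => ((x : Int) == r + k * dr) && ((y : Int) == c + k * dc))

lemma onRayB_succ (dr dc r c : Int) (f : Nat) (x y : Nat) :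
    onRayB dr dc r c (f + 1) x y =
      ((((x : Int) == r) && ((y : Int) == c)) || onRayB dr dc (r + dr) (c + dc) f x y) := by
  apply Bool.eq_iff_iff.mpr
  simp only [onRayB, List.any_eq_true, List.mem_range, Bool.and_eq_true, Bool.or_eq_true,
    beq_iff_eq]
  constructor
  · rintro ⟨k, hk, h1, h2⟩
    cases k with
    | zero =>
        left
        exact ⟨by simpa using h1, by simpa using h2⟩
    | succ j =>
        right
        refine ⟨j, by omega, ?_, ?_⟩
        · rw [h1]; push_cast; ring
        · rw [h2]; push_cast; ring
  · rintro (⟨h1, h2⟩ | ⟨j, hj, h1, h2⟩)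
    · exact ⟨0, by omega, by simpa using h1, by simpa using h2⟩
    · refine ⟨j + 1, by omega, ?_, ?_⟩
      · rw [h1]; push_cast; ring
      · rw [h2]; push_cast; ring

lemma walkA_shape (rows cols dr dc color : Int) (f : Nat) :
    ∀ (r c : Int) (m : List (List Int)),
    (walkA rows cols dr dc color f r c m).length = m.length ∧
    ∀ x : Nat, ((walkA rows cols dr dc color f r c m).getD x []).length = (m.getD x []).length := by
  induction f with
  | zero => intro r c m; exact ⟨rfl, fun _ => rfl⟩
  | succ f ih =>
      intro r c m
      simp only [walkA]
      by_cases h : 0 ≤ r ∧ r < rows ∧ 0 ≤ c ∧ c < cols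
      · rw [if_pos h]
        refine ⟨?_, ?_⟩
        · rw [(ih _ _ _).1, length_pySet2]
        · intro x
          rw [(ih _ _ _).2 x, rowlen_pySet2]
      · rw [if_neg h]; exact ⟨rfl, fun _ => rfl⟩

lemma walkA_get (R C : Nat) (dr dc color : Int) (hdr : dr = -1 ∨ dr = 1) (hdc : dc = -1 ∨ dc = 1)
    (f : Nat) :
    ∀ (r c : Int) (m : List (List Int)),
    m.length = R → (∀ i : Nat, i < R → (m.getD i []).length = C) →
    (r < 0 → dr = -1) → ((R : Int) ≤ r → dr = 1) →
    (c < 0 → dc = -1) → ((C : Int) ≤ c → dc = 1) →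
    ∀ x y : Nat, x < R → y < C →
    get2 (walkA (R : Int) (C : Int) dr dc color f r c m) x y =
      (if onRayB dr dc r c f x y then color else get2 m x y) := by
  induction f with
  | zero =>
      intro r c m _ _ _ _ _ _ x y _ _
      simp [walkA, onRayB]
  | succ f ih =>
      intro r c m hm hrow h1 h2 h3 h4 x y hx hy
      simp only [walkA]
      by_cases hb : 0 ≤ r ∧ r < (R : Int) ∧ 0 ≤ c ∧ c < (C : Int)
      · rw [if_pos hb]
        have hlen : (m.getD r.toNat []).length = C := hrow r.toNat (by omega)
        have hm' : (pySet2 m r c color).length = R := by rw [length_pySet2, hm]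
        have hrow' : ∀ i : Nat, i < R → ((pySet2 m r c color).getD i []).length = C := by
          intro i hi; rw [rowlen_pySet2]; exact hrow i hi
        have h1' : r + dr < 0 → dr = -1 := by
          intro h; rcases hdr with h' | h' <;> omega
        have h2' : (R : Int) ≤ r + dr → dr = 1 := by
          intro h; rcases hdr with h' | h' <;> omega
        have h3' : c + dc < 0 → dc = -1 := by
          intro h; rcases hdc with h' | h' <;> omega
        have h4' : (C : Int) ≤ c + dc → dc = 1 := by
          intro h; rcases hdc with h' | h' <;> omega
        rw [ih _ _ _ hm' hrow' h1' h2' h3' h4' x y hx hy]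
        have hset := get2_pySet2 m r c color hb.1 (by omega)
          (by rw [if_neg (by omega : ¬ c < 0)]; omega)
          (by rw [if_neg (by omega : ¬ c < 0), hlen]; omega) x y
        rw [if_neg (by omega : ¬ c < 0)] at hset
        rw [hset, onRayB_succ]
        by_cases hray : onRayB dr dc (r + dr) (c + dc) f x y = true
        · simp [hray]
        · simp only [hray, Bool.or_false, if_false]
          by_cases hxy : (x : Int) = r ∧ (y : Int) = c
          · rw [if_pos hxy]
            simp [hxy.1, hxy.2]
          · rw [if_neg hxy]
            have : ¬ (((x : Int) == r) && ((y : Int) == c)) = true := by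
              simp only [Bool.and_eq_true, beq_iff_eq]; exact hxy
            simp [this]
      · rw [if_neg hb]
        have hfalse : onRayB dr dc r c (f + 1) x y = false := by
          simp only [onRayB, List.any_eq_false, Bool.and_eq_true, beq_iff_eq, not_and,
            List.mem_range]
          intro k hk
          push_neg at hb
          rcases lt_or_ge r 0 with hr0 | hr0
          · have hd := h1 hr0
            subst hd
            intro h1eq
            exfalso; omega
          · rcases le_or_gt (R : Int) r with hrR | hrR
            · have hd := h2 hrR
              subst hd
              intro h1eq; exfalso; omega
            · rcases lt_or_ge c 0 with hc0 | hc0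
              · have hd := h3 hc0
                subst hd
                intro _ h2eq
                exact absurd h2eq (by omega)
              · have hcC : (C : Int) ≤ c := hb (by omega) (by omega) (by omega)
                have hd := h4 hcC
                subst hd
                intro _ h2eq
                exact absurd h2eq (by omega)
        rw [hfalse]
        simp

lemma foldl_inv {α σ : Type} (l : List α) (f : σ → α → σ) (P : σ → Prop) (s0 : σ)
    (h0 : P s0) (hstep : ∀ s a, a ∈ l → P s → P (f s a)) : P (l.foldl f s0) := by
  induction l generalizing s0 with
  | nil => exact h0
  | cons a t ih =>
      exact ih _ (hstep _ _ (List.mem_cons_self) h0)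
        (fun s b hb hs => hstep s b (List.mem_cons_of_mem _ hb) hs)

lemma scanA_inv (grid : List (List Int)) (cols : Nat) :
    (scanA grid cols = (-1, -1, 0)) ∨
    (0 ≤ (scanA grid cols).1 ∧ (scanA grid cols).1 < (grid.length : Int) ∧
     0 ≤ (scanA grid cols).2.1 ∧ (scanA grid cols).2.1 < (cols : Int)) := by
  unfold scanA
  apply foldl_inv _ _ (fun st => st = (-1, -1, 0) ∨
    (0 ≤ st.1 ∧ st.1 < (grid.length : Int) ∧ 0 ≤ st.2.1 ∧ st.2.1 < (cols : Int)))
  · exact Or.inl rfl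
  · intro s r hr hs
    apply foldl_inv _ _ (fun st => st = (-1, -1, 0) ∨
      (0 ≤ st.1 ∧ st.1 < (grid.length : Int) ∧ 0 ≤ st.2.1 ∧ st.2.1 < (cols : Int)))
    · exact hs
    · intro s' c hc hs'
      by_cases h : (grid.getD r []).getD c 0 ≠ 0
      · rw [if_pos h]
        right
        have hr' : r < grid.length := List.mem_range.mp hr
        have hc' : c < cols := List.mem_range.mp hc
        refine ⟨?_, ?_, ?_, ?_⟩ <;> dsimp only <;> omega
      · rw [if_neg h]; exact hs'

lemma foldl_enum {α σ : Type} (d : α) (f : σ → Int → α → σ) (xs : List α) :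
    ∀ (n : Nat), n ≤ xs.length → ∀ acc : σ,
    (PySem.List.enumerate (xs.take n) 0).foldl (fun s q => f s q.1 q.2) acc
      = (List.range n).foldl (fun s (c : Nat) => f s (c : Int) (xs.getD c d)) acc := by
  intro n
  induction n with
  | zero => intro _ acc; simp [PySem.List.enumerate]
  | succ n ih =>
      intro hn acc
      have hn' : n < xs.length := by omega
      have htake : xs.take (n + 1) = xs.take n ++ [xs[n]] := by
        rw [List.take_succ, List.getElem?_eq_getElem hn']
        rfl
      rw [htake, PySem.List.enumerate_append, List.foldl_append,
        ih (by omega), List.range_succ, List.foldl_append]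
      have hlen : (xs.take n).length = n := List.length_take_of_le (by omega)
      simp [hlen, PySem.List.enumerate_cons, PySem.List.enumerate_nil,
        List.getElem?_eq_getElem hn']

lemma foldl_enum_all {α σ : Type} (d : α) (f : σ → Int → α → σ) (xs : List α) (acc : σ) :
    (PySem.List.enumerate xs 0).foldl (fun s q => f s q.1 q.2) acc
      = (List.range xs.length).foldl (fun s (c : Nat) => f s (c : Int) (xs.getD c d)) acc := by
  have h := foldl_enum d f xs xs.length le_rfl acc
  rwa [List.take_length] at h

lemma scanB_eq_scanA (grid : List (List Int)) (cols : Nat)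
    (h : ∀ row ∈ grid, cols ≤ row.length) : scanB grid cols = scanA grid cols := by
  unfold scanB scanA
  rw [foldl_enum_all ([] : List Int)
    (fun s r row => (PySem.List.enumerate (row.take cols) 0).foldl
      (fun s q => if q.2 ≠ 0 then (r, q.1, q.2) else s) s) grid]
  apply PySem.List.foldl_congr_mem
  intro acc r hr
  have hr' : r < grid.length := List.mem_range.mp hr
  have hmem : grid.getD r [] ∈ grid := by
    rw [List.getD_eq_getElem _ _ hr']
    exact List.getElem_mem hr'
  exact foldl_enum 0 (fun s c v => if v ≠ 0 then ((r : Int), (c : Int), v) else s)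
    (grid.getD r []) cols (h _ hmem) acc

lemma pySet2_wrap (m : List (List Int)) (r c v : Int)
    (hr : 0 ≤ (if r < 0 then r + (m.length : Int) else r))
    (hc : 0 ≤ (if c < 0 then
        c + ((m.getD (if r < 0 then r + (m.length : Int) else r).toNat []).length : Int) else c)) :
    pySet2 m r c v = pySet2 m (if r < 0 then r + (m.length : Int) else r)
      (if c < 0 then
        c + ((m.getD (if r < 0 then r + (m.length : Int) else r).toNat []).length : Int) else c) v := by
  by_cases h1 : r < 0 <;> by_cases h2 : c < 0 <;>
    simp only [pySet2, h1, h2, if_true, if_false] at hr hc ⊢ <;>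
    first
      | rfl
      | rw [if_neg (by omega), if_neg (by omega)]
      | rw [if_neg (by omega)]

lemma diag_iff (R C : Nat) (dr dc : Int)
    (hdr0 : 0 ≤ dr) (hdrR : dr < (R : Int)) (hdc0 : 0 ≤ dc) (hdcC : dc < (C : Int))
    (x y : Nat) (hx : x < R) (hy : y < C) :
    (((x : Int) - dr).natAbs = ((y : Int) - dc).natAbs) ↔
      (onRayB 1 1 (dr + 1) (dc + 1) (R + C + 2) x y = true ∨
       onRayB 1 (-1) (dr + 1) (dc + -1) (R + C + 2) x y = true ∨
       onRayB (-1) 1 (dr + -1) (dc + 1) (R + C + 2) x y = true ∨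
       onRayB (-1) (-1) (dr + -1) (dc + -1) (R + C + 2) x y = true ∨
       ((x : Int) = dr ∧ (y : Int) = dc)) := by
  simp only [onRayB, List.any_eq_true, List.mem_range, Bool.and_eq_true, beq_iff_eq,
    mul_one, mul_neg_one]
  constructor
  · intro habs
    rcases lt_trichotomy (x : Int) dr with hxd | hxd | hxd
    · rcases lt_trichotomy (y : Int) dc with hyd | hyd | hyd
      · exact Or.inr (Or.inr (Or.inr (Or.inl ⟨(dr - 1 - x).toNat, by omega, by omega, by omega⟩)))
      · exfalso; omega
      · exact Or.inr (Or.inr (Or.inl ⟨(dr - 1 - x).toNat, by omega, by omega, by omega⟩))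
    · right; right; right; right; omega
    · rcases lt_trichotomy (y : Int) dc with hyd | hyd | hyd
      · exact Or.inr (Or.inl ⟨(x - dr - 1).toNat, by omega, by omega, by omega⟩)
      · exfalso; omega
      · exact Or.inl ⟨(x - dr - 1).toNat, by omega, by omega, by omega⟩
  · rintro (⟨k, hk, e1, e2⟩ | ⟨k, hk, e1, e2⟩ | ⟨k, hk, e1, e2⟩ | ⟨k, hk, e1, e2⟩ | ⟨e1, e2⟩) <;>
      omega

lemma getElem_eq_get2 (m : List (List Int)) (x y : Nat) (hx : x < m.length)
    (hy : y < m[x].length) : m[x][y] = get2 m x y := by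
  unfold get2
  rw [List.getD_eq_getElem _ _ hx, List.getD_eq_getElem _ _ hy]

set_option maxHeartbeats 2000000 in
lemma chain_eq (R C : Nat) (dr dc color : Int) (hR1 : 1 ≤ R) (hC1 : 1 ≤ C)
    (hb1 : -1 ≤ dr) (hb2 : dr < (R : Int)) (hb3 : -1 ≤ dc) (hb4 : dc < (C : Int))
    (hcase : (dr = -1 ∧ dc = -1 ∧ color = 0) ∨ (0 ≤ dr ∧ 0 ≤ dc)) :
    walkA (↑R) (↑C) 1 1 color (R + C + 2) (dr + 1) (dc + 1)
      (walkA (↑R) (↑C) 1 (-1) color (R + C + 2) (dr + 1) (dc + -1)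
        (walkA (↑R) (↑C) (-1) 1 color (R + C + 2) (dr + -1) (dc + 1)
          (walkA (↑R) (↑C) (-1) (-1) color (R + C + 2) (dr + -1) (dc + -1)
            (pySet2 (List.replicate R (List.replicate C (0 : Int))) dr dc color))))
    = (List.range R).map (fun (r : Nat) => (List.range C).map (fun (c : Nat) =>
        if ((r : Int) - dr).natAbs = ((c : Int) - dc).natAbs then color else 0)) := by
  -- the zero grid and its shape
  set z : List (List Int) := List.replicate R (List.replicate C (0 : Int)) with hz
  have hzlen : z.length = R := by simp [hz]
  have hzrow : ∀ i : Nat, i < R → (z.getD i []).length = C := by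
    intro i hi
    rw [hz, List.getD_eq_getElem _ _ (by simpa using hi), List.getElem_replicate]
    simp
  have hzget : ∀ x y : Nat, get2 z x y = 0 := by
    intro x y
    simp only [get2, hz, List.getD_eq_getElem?_getD, List.getElem?_replicate]
    split_ifs <;> simp
  -- wrapped dot coordinates
  set wr : Int := if dr < 0 then dr + (R : Int) else dr with hwr
  have hwr0 : 0 ≤ wr := by rw [hwr]; split_ifs <;> omega
  have hwrR : wr < (R : Int) := by rw [hwr]; split_ifs <;> omega
  have hrowlen : (z.getD wr.toNat []).length = C := hzrow wr.toNat (by omega)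
  set wc : Int := if dc < 0 then dc + (C : Int) else dc with hwc
  have hwc0 : 0 ≤ wc := by rw [hwc]; split_ifs <;> omega
  have hwcC : wc < (C : Int) := by rw [hwc]; split_ifs <;> omega
  -- the dot write r0 and its contents
  have hr0eq : pySet2 z dr dc color = pySet2 z wr wc color := by
    rw [pySet2_wrap z dr dc color (by rw [hzlen, ← hwr]; exact hwr0)
      (by rw [hzlen, ← hwr, hrowlen, ← hwc]; exact hwc0)]
    rw [hzlen, ← hwr, hrowlen, ← hwc]
  have hr0len : (pySet2 z dr dc color).length = R := by rw [length_pySet2, hzlen]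
  have hr0row : ∀ i : Nat, i < R → ((pySet2 z dr dc color).getD i []).length = C := by
    intro i hi; rw [rowlen_pySet2]; exact hzrow i hi
  have hr0get : ∀ x y : Nat,
      get2 (pySet2 z dr dc color) x y = if (x : Int) = wr ∧ (y : Int) = wc then color else 0 := by
    intro x y
    rw [hr0eq]
    have h := get2_pySet2 z wr wc color hwr0 (by omega)
      (by rw [if_neg (show ¬ wc < 0 by omega)]; exact hwc0)
      (by rw [if_neg (show ¬ wc < 0 by omega), hrowlen]; exact hwcC) x y
    rw [if_neg (show ¬ wc < 0 by omega)] at h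
    rw [h, hzget]
  -- shapes through the chain
  have hs1 := walkA_shape (↑R) (↑C) (-1) (-1) color (R + C + 2) (dr + -1) (dc + -1)
    (pySet2 z dr dc color)
  set m1 := walkA (↑R) (↑C) (-1) (-1) color (R + C + 2) (dr + -1) (dc + -1)
    (pySet2 z dr dc color) with hm1
  have hm1len : m1.length = R := by rw [hs1.1, hr0len]
  have hm1row : ∀ i : Nat, i < R → (m1.getD i []).length = C := by
    intro i hi; rw [hs1.2 i]; exact hr0row i hi
  have hs2 := walkA_shape (↑R) (↑C) (-1) 1 color (R + C + 2) (dr + -1) (dc + 1) m1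
  set m2 := walkA (↑R) (↑C) (-1) 1 color (R + C + 2) (dr + -1) (dc + 1) m1 with hm2
  have hm2len : m2.length = R := by rw [hs2.1, hm1len]
  have hm2row : ∀ i : Nat, i < R → (m2.getD i []).length = C := by
    intro i hi; rw [hs2.2 i]; exact hm1row i hi
  have hs3 := walkA_shape (↑R) (↑C) 1 (-1) color (R + C + 2) (dr + 1) (dc + -1) m2
  set m3 := walkA (↑R) (↑C) 1 (-1) color (R + C + 2) (dr + 1) (dc + -1) m2 with hm3
  have hm3len : m3.length = R := by rw [hs3.1, hm2len]
  have hm3row : ∀ i : Nat, i < R → (m3.getD i []).length = C := by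
    intro i hi; rw [hs3.2 i]; exact hm2row i hi
  have hs4 := walkA_shape (↑R) (↑C) 1 1 color (R + C + 2) (dr + 1) (dc + 1) m3
  set m4 := walkA (↑R) (↑C) 1 1 color (R + C + 2) (dr + 1) (dc + 1) m3 with hm4
  have hm4len : m4.length = R := by rw [hs4.1, hm3len]
  have hm4row : ∀ i : Nat, i < R → (m4.getD i []).length = C := by
    intro i hi; rw [hs4.2 i]; exact hm3row i hi
  -- pointwise value of the chain
  have hval : ∀ x y : Nat, x < R → y < C →
      get2 m4 x y =
        if ((x : Int) - dr).natAbs = ((y : Int) - dc).natAbs then color else 0 := by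
    intro x y hx hy
    rw [hm4, walkA_get R C 1 1 color (Or.inr rfl) (Or.inr rfl) (R + C + 2) (dr + 1) (dc + 1)
      m3 hm3len hm3row (fun h => absurd h (by omega)) (fun _ => rfl)
      (fun h => absurd h (by omega)) (fun _ => rfl) x y hx hy]
    rw [hm3, walkA_get R C 1 (-1) color (Or.inr rfl) (Or.inl rfl) (R + C + 2) (dr + 1) (dc + -1)
      m2 hm2len hm2row (fun h => absurd h (by omega)) (fun _ => rfl)
      (fun _ => rfl) (fun h => absurd h (by omega)) x y hx hy]
    rw [hm2, walkA_get R C (-1) 1 color (Or.inl rfl) (Or.inr rfl) (R + C + 2) (dr + -1) (dc + 1)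
      m1 hm1len hm1row (fun _ => rfl) (fun h => absurd h (by omega))
      (fun h => absurd h (by omega)) (fun _ => rfl) x y hx hy]
    rw [hm1, walkA_get R C (-1) (-1) color (Or.inl rfl) (Or.inl rfl) (R + C + 2) (dr + -1)
      (dc + -1) (pySet2 z dr dc color) hr0len hr0row (fun _ => rfl)
      (fun h => absurd h (by omega)) (fun _ => rfl) (fun h => absurd h (by omega)) x y hx hy]
    rw [hr0get x y]
    rcases hcase with ⟨h1, h2, h3⟩ | ⟨h1, h2⟩
    · subst h1; subst h2; subst h3
      split_ifs <;> rfl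
    · have hwre : wr = dr := by rw [hwr, if_neg (by omega)]
      have hwce : wc = dc := by rw [hwc, if_neg (by omega)]
      rw [hwre, hwce]
      have hiff := diag_iff R C dr dc h1 hb2 h2 hb4 x y hx hy
      by_cases habs : ((x : Int) - dr).natAbs = ((y : Int) - dc).natAbs
      · rw [if_pos habs]
        have hdis := hiff.mp habs
        split_ifs <;> tauto
      · rw [if_neg habs]
        have hnd := fun h => habs (hiff.mpr h)
        split_ifs with e1 e2 e3 e4 e5 <;> [skip; skip; skip; skip; skip; rfl] <;>
          exact absurd (by tauto) hnd
  -- assemble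
  apply List.ext_getElem
  · rw [hm4len, List.length_map, List.length_range]
  intro x hx hx'
  have hxR : x < R := by rwa [hm4len] at hx
  have hrow : m4[x].length = C := by
    rw [← List.getD_eq_getElem m4 [] hx]; exact hm4row x hxR
  apply List.ext_getElem
  · rw [hrow]
    rw [List.getElem_map, List.length_map, List.length_range]
  intro y hy hy'
  have hyC : y < C := by rwa [hrow] at hy
  rw [getElem_eq_get2 m4 x y hx hy, hval x y hxR hyC]
  simp only [List.getElem_map, List.getElem_range]

set_option maxHeartbeats 1000000 in

set_option maxHeartbeats 1000000 in
theorem main_eq (grid : List (List Int))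
    (hne : grid ≠ []) (hpos : 0 < (grid.headD []).length)
    (hall : ∀ row ∈ grid, (grid.headD []).length ≤ row.length) :
    solve_623ea044 grid = solve_623ea044_alt grid := by
  unfold solve_623ea044 solve_623ea044_alt
  dsimp only
  rw [scanB_eq_scanA grid _ hall]
  simp only [List.foldl_cons, List.foldl_nil]
  set R : Nat := grid.length with hR
  set C : Nat := (grid.headD []).length with hC
  set st := scanA grid C with hst
  have hR1 : 1 ≤ R := by
    cases grid with
    | nil => exact absurd rfl hne
    | cons a t => simp [hR]
  have hC1 : 1 ≤ C := hpos
  have inv := scanA_inv grid C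
  rw [← hst] at inv
  have hcase : (st.1 = -1 ∧ st.2.1 = -1 ∧ st.2.2 = 0) ∨ (0 ≤ st.1 ∧ 0 ≤ st.2.1) := by
    rcases inv with h | h
    · left; rw [h]; exact ⟨rfl, rfl, rfl⟩
    · right; exact ⟨h.1, h.2.2.1⟩
  have hb1 : -1 ≤ st.1 := by rcases hcase with h | h <;> omega
  have hb3 : -1 ≤ st.2.1 := by rcases hcase with h | h <;> omega
  have hb2 : st.1 < (R : Int) := by
    rcases inv with h | h
    · rw [h]; dsimp only; omega
    · exact h.2.1
  have hb4 : st.2.1 < (C : Int) := by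
    rcases inv with h | h
    · rw [h]; dsimp only; omega
    · exact h.2.2.2
  exact chain_eq R C st.1 st.2.1 st.2.2 hR1 hC1 hb1 hb2 hb3 hb4 hcase


-- ===== VERDICT (by name: the statement is the Claim_ definition above) =====
theorem solve_623ea044_spec : Claim_equal_solve_623ea044 := by
  intro grid _ hpre
  unfold Spec_solve_623ea044
  exact main_eq grid hpre.1 hpre.2.1 hpre.2.2
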